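-- pv_equiv track=rewrite | github.com/Wallace-F-Rosa/TCC | vis-atractors.py | getAtractorLabel
-- ===== SOURCE A (Python) =====
-- def getAtractorLabel(atractor, nodes):
--     label = []
--     for i in range(len(nodes)):
--         for s in atractor:
--             if (s>>i)%2 == 1:
--                 label.append(nodes[i])
--
--     text = ''
--     for i in range(len(label)-1):
--       if i > 0 and i%4 == 0:
--         text += '<br>'
--       text += label[i] + ', '
--     text += label[len(label)-1]
--
--     return text
-- ===== SOURCE B (Python) =====
-- def _chunks(body):
--     parts = [', '.join(body[j:j+4]) for j in range(0, len(body), 4)]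
--     return ', <br>'.join(parts)
--
-- def getAtractorLabel(atractor, nodes):
--     label = [nodes[i] for i in range(len(nodes)) for s in atractor if (s >> i) % 2 == 1]
--     last = label[-1]
--     body = label[:-1]
--     return _chunks(body) + ', ' + last if body else last
-- ===== Notes on version B (the rewrite author's own statement) =====
-- stated objective: idiomatic
-- what changed: The label list is built by a comprehension and the index-modulo-4 assembly loop is replaced by splitting off the last element and joining the rest as recursive groups of four ('.join' per group, ', <br>' between groups).
import Mathlib
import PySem

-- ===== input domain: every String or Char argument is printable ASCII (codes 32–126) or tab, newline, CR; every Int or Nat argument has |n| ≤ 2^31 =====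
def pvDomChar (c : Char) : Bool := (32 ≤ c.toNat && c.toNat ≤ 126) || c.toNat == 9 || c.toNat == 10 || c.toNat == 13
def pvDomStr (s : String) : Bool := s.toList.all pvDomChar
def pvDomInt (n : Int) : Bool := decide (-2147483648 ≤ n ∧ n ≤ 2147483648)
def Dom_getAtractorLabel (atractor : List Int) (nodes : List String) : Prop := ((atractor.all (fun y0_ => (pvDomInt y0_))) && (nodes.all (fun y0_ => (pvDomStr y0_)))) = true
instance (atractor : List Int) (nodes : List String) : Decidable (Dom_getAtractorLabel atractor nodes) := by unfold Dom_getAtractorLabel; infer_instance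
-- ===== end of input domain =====

-- B replaces A's per-index modulo-4 assembly loop with a groups-of-four chunking join (idiomatic decomposition, same cost).

-- ===== PORT A =====
def getAtractorLabel (atractor : List Int) (nodes : List String) : String :=
  -- label = []; for i in range(len(nodes)): for s in atractor: if (s>>i)%2 == 1: label.append(nodes[i])
  let label : List String :=
    (PySem.List.pyRange 0 (nodes.length : Int) 1).foldl
      (fun acc i =>
        atractor.foldl
          (fun acc2 s =>
            if PySem.Int.mod (s >>> i.toNat) 2 = 1 then acc2 ++ [PySem.List.pyGetD nodes i ""]
            else acc2)
          acc)
      []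
  -- text = ''; for i in range(len(label)-1): if i>0 and i%4==0: text += '<br>'; text += label[i] + ', '
  let text : String :=
    (PySem.List.pyRange 0 ((label.length : Int) - 1) 1).foldl
      (fun t i =>
        (if i > 0 ∧ PySem.Int.mod i 4 = 0 then t ++ "<br>" else t)
          ++ PySem.List.pyGetD label i "" ++ ", ")
      ""
  -- text += label[len(label)-1]   (IndexError on an empty label is excluded by Pre_)
  text ++ PySem.List.pyGetD label ((label.length : Int) - 1) ""

-- ===== PORT B =====
-- _chunks(body): parts = [', '.join(body[j:j+4]) for j in range(0, len(body), 4)]; return ', <br>'.join(parts)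
def pvChunksJoin (body : List String) : String :=
  PySem.Str.join ", <br>"
    ((PySem.List.pyRange 0 (body.length : Int) 4).map
      (fun j => PySem.Str.join ", " (PySem.List.slice body (some j) (some (j + 4)))))

def getAtractorLabel_alt (atractor : List Int) (nodes : List String) : String :=
  -- label = [nodes[i] for i in range(len(nodes)) for s in atractor if (s >> i) % 2 == 1]
  let label : List String :=
    (PySem.List.pyRange 0 (nodes.length : Int) 1).flatMap
      (fun i =>
        (atractor.filter (fun s => decide (PySem.Int.mod (s >>> i.toNat) 2 = 1))).map
          (fun _ => PySem.List.pyGetD nodes i ""))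
  -- last = label[-1]   (IndexError on an empty label is excluded by Pre_)
  let last := PySem.List.pyGetD label (-1) ""
  -- body = label[:-1]
  let body := PySem.List.slice label none (some (-1))
  -- _chunks(body) + ', ' + last if body else last
  if body = [] then last else pvChunksJoin body ++ ", " ++ last

-- ===== PRECONDITION & SPEC =====
-- Pre_ excludes exactly the inputs on which no attractor state has any node bit set, so label
-- stays empty and A raises IndexError at label[len(label)-1] (B likewise at label[-1]).
def Pre_getAtractorLabel (atractor : List Int) (nodes : List String) : Prop :=
  ∃ i < nodes.length, ∃ s ∈ atractor, PySem.Int.mod (s >>> i) 2 = 1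
instance (atractor : List Int) (nodes : List String) : Decidable (Pre_getAtractorLabel atractor nodes) := by
  unfold Pre_getAtractorLabel; infer_instance

def pvWitness_getAtractorLabel : List Int × List String := ([1], ["A"])

def Spec_getAtractorLabel (atractor : List Int) (nodes : List String) (out : String) : Prop := out = getAtractorLabel_alt atractor nodes
instance (atractor : List Int) (nodes : List String) (out : String) : Decidable (Spec_getAtractorLabel atractor nodes out) := by unfold Spec_getAtractorLabel; infer_instance

-- ===== CLAIM (what is proved, stated in full; the proofs are below) =====
def Claim_equal_getAtractorLabel : Prop := ∀ (atractor : List Int) (nodes : List String), Dom_getAtractorLabel atractor nodes → Pre_getAtractorLabel atractor nodes → Spec_getAtractorLabel atractor nodes (getAtractorLabel atractor nodes)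

-- ===== LEMMAS AND PROOFS =====

-- the chunk list of B's comprehension, as a structural recursion (proof-side view of the same value)
def pvParts (body : List String) : List String :=
  if h : body = [] then []
  else PySem.Str.join ", " (body.take 4) :: pvParts (body.drop 4)
termination_by body.length
decreasing_by
  simp only [List.length_drop]
  have : body.length ≠ 0 := fun hz => h (List.eq_nil_of_length_eq_zero hz)
  omega

-- range(0, n, 4) peels its first index
theorem pvRange4_cons (n : Int) (h : 0 < n) :
    PySem.List.pyRange 0 n 4 = 0 :: PySem.List.pyRange 4 n 4 := by
  rw [PySem.List.pyRange_of_pos _ _ (by norm_num), PySem.List.pyRange_of_pos _ _ (by norm_num)]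
  by_cases h4 : 4 < n
  · rw [if_pos h, if_pos h4,
      show ((n - 0 + 4 - 1) / 4).toNat = ((n - 4 + 4 - 1) / 4).toNat + 1 by omega,
      List.range_succ_eq_map, List.map_cons, List.map_map]
    congr 1
    exact List.map_congr_left (fun k _ => by simp only [Function.comp_def]; push_cast; ring)
  · rw [if_pos h, if_neg h4, show ((n - 0 + 4 - 1) / 4).toNat = 1 by omega]
    simp [List.range_succ]

-- range(4, n, 4) is range(0, n-4, 4) shifted by 4
theorem pvRange4_shift (n : Int) :
    PySem.List.pyRange 4 n 4 = (PySem.List.pyRange 0 (n - 4) 4).map (fun j => j + 4) := by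
  rw [PySem.List.pyRange_of_pos _ _ (by norm_num), PySem.List.pyRange_of_pos _ _ (by norm_num)]
  by_cases h4 : 4 < n
  · rw [if_pos h4, if_pos (by omega), show (n - 4 + 4 - 1) / 4 = (n - 4 - 0 + 4 - 1) / 4 by omega]
    simp only [List.map_map, Function.comp_def]
    exact List.map_congr_left (fun k _ => by ring)
  · rw [if_neg h4, if_neg (by omega)]
    simp

-- B's comprehension computes the structural chunk list
theorem pvPartsEq (body : List String) :
    (PySem.List.pyRange 0 (body.length : Int) 4).map
      (fun j => PySem.Str.join ", " (PySem.List.slice body (some j) (some (j + 4))))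
    = pvParts body := by
  induction body using pvParts.induct with
  | case1 =>
    rw [pvParts]
    simp [PySem.List.pyRange_of_pos _ _ (by norm_num : (0:Int) < 4)]
  | case2 body h ih =>
    have hlen : 0 < body.length := List.length_pos_iff.mpr h
    rw [pvParts, dif_neg h, pvRange4_cons _ (by exact_mod_cast hlen), List.map_cons]
    congr 1
    · congr 1
      rw [PySem.List.slice_zero_start, show ((0:Int) + 4) = ((4:Nat) : Int) by norm_num,
        PySem.List.slice_to_natCast]
    · rw [pvRange4_shift, List.map_map]
      by_cases h4 : body.length ≤ 4
      · have hd : body.drop 4 = [] := List.drop_eq_nil_of_le h4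
        have hr : PySem.List.pyRange 0 ((body.length : Int) - 4) 4 = [] := by
          rw [PySem.List.pyRange_of_pos _ _ (by norm_num : (0:Int) < 4),
            if_neg (by omega : ¬ (0:Int) < (body.length : Int) - 4)]
          simp
        rw [hr, hd, pvParts]
        simp
      · have hlend : ((body.drop 4).length : Int) = (body.length : Int) - 4 := by
          rw [List.length_drop]; omega
        rw [hlend] at ih
        rw [← ih]
        refine List.map_congr_left (fun j hj => ?_)
        have hj0 : 0 ≤ j := ((PySem.List.mem_pyRange_iff_of_pos (by norm_num) j).mp hj).1
        simp only [Function.comp_def]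
        congr 1
        rw [PySem.List.slice_toNat _ (by omega) (by omega),
          PySem.List.slice_toNat _ (by omega) (by omega), List.drop_drop,
          show ((j+4)+4).toNat - (j+4).toNat = 4 by omega,
          show (j+4).toNat - j.toNat = 4 by omega,
          show (j+4).toNat = j.toNat + 4 by omega, Nat.add_comm j.toNat 4]

-- the character stream A's assembly loop emits for the elements of `body` starting at index k
def pvRender (k : Nat) : List String → List Char
  | [] => []
  | a :: r => (if 0 < k ∧ k % 4 = 0 then "<br>".toList else []) ++ a.toList ++ (", ").toList ++ pvRender (k + 1) r

theorem pvRender_cons (k : Nat) (a : String) (r : List String) :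
    pvRender k (a :: r)
      = (if 0 < k ∧ k % 4 = 0 then "<br>".toList else []) ++ a.toList ++ (", ").toList ++ pvRender (k + 1) r := rfl

-- A's indexed assembly fold, read off against the list it walks
theorem pvFoldRender (body : List String) : ∀ (big : List String) (k : Nat) (t : String),
    (∀ j (hj : j < body.length), PySem.List.pyGetD big ((k : Int) + (j : Int)) "" = body[j]) →
    ((PySem.List.pyRange (k : Int) ((k : Int) + (body.length : Int)) 1).foldl
      (fun t i =>
        (if i > 0 ∧ PySem.Int.mod i 4 = 0 then t ++ "<br>" else t)
          ++ PySem.List.pyGetD big i "" ++ ", ") t).toList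
      = t.toList ++ pvRender k body := by
  induction body with
  | nil => intro big k t h; simp [PySem.List.pyRange_one_eq_nil, pvRender]
  | cons a r ih =>
    intro big k t h
    rw [PySem.List.pyRange_one_cons (by push_cast [List.length_cons]; omega)]
    simp only [List.foldl_cons]
    have h0 : PySem.List.pyGetD big (k : Int) "" = a := by
      have := h 0 (by simp); simpa using this
    have hcond : ((k:Int) > 0 ∧ PySem.Int.mod (k:Int) 4 = 0) ↔ (0 < k ∧ k % 4 = 0) := by
      rw [PySem.Int.mod_eq_emod_of_pos (by norm_num)]
      omega
    have hrange : ((k:Int) + 1) = (((k+1 : Nat)):Int) := by push_cast; ring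
    have hend : ((k:Int) + ((a :: r).length : Int)) = (((k+1:Nat)):Int) + (r.length : Int) := by
      push_cast [List.length_cons]; ring
    rw [hend, hrange]
    rw [ih big (k+1) _ (fun j hj => by
      have := h (j+1) (by simpa using Nat.succ_lt_succ hj)
      push_cast at this ⊢
      rw [show (k:Int) + 1 + j = (k:Int) + (j+1) by ring]
      simpa using this)]
    rw [h0]
    simp only [pvRender_cons]
    by_cases hc : 0 < k ∧ k % 4 = 0
    · rw [if_pos (hcond.mpr hc), if_pos hc]
      simp [String.toList_append]
    · rw [if_neg (fun hh => hc (hcond.mp hh)), if_neg hc]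
      simp [String.toList_append]

theorem pvIns (k : Nat) (hk : k % 4 = 0) :
    (if 0 < k ∧ k % 4 = 0 then "<br>".toList else []) = (if k = 0 then [] else "<br>".toList) := by
  rcases Nat.eq_zero_or_pos k with h | h
  · simp [h]
  · rw [if_pos ⟨h, hk⟩, if_neg (by omega)]

-- the emitted stream is the chunked join of the structural chunk list, for a chunk-aligned start
theorem pvRenderChunks : ∀ (body : List String) (k : Nat), k % 4 = 0 →
    pvRender k body
      = if body = [] then []
        else (if k = 0 then [] else "<br>".toList)
          ++ (PySem.Str.join ", <br>" (pvParts body)).toList ++ (", ").toList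
  | [], k, hk => by simp [pvRender]
  | [a], k, hk => by
    rw [pvParts, pvRender_cons, pvIns k hk]
    simp [pvRender, pvParts, PySem.Str.toList_join, PySem.Chars.join_singleton]
  | [a,b], k, hk => by
    rw [pvParts, pvRender_cons, pvRender_cons, pvIns k hk]
    have h1 : ¬ ((k+1) % 4 = 0) := by omega
    simp [pvRender, pvParts, PySem.Str.toList_join, PySem.Chars.join_cons_cons,
      PySem.Chars.join_singleton, h1]
  | [a,b,c], k, hk => by
    rw [pvParts, pvRender_cons, pvRender_cons, pvRender_cons, pvIns k hk]
    have h1 : ¬ ((k+1) % 4 = 0) := by omega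
    have h2 : ¬ ((k+1+1) % 4 = 0) := by omega
    simp [pvRender, pvParts, PySem.Str.toList_join, PySem.Chars.join_cons_cons,
      PySem.Chars.join_singleton, h1, h2]
  | [a,b,c,d], k, hk => by
    rw [pvParts, pvRender_cons, pvRender_cons, pvRender_cons, pvRender_cons, pvIns k hk]
    have h1 : ¬ ((k+1) % 4 = 0) := by omega
    have h2 : ¬ ((k+1+1) % 4 = 0) := by omega
    have h3 : ¬ ((k+1+1+1) % 4 = 0) := by omega
    simp [pvRender, pvParts, PySem.Str.toList_join, PySem.Chars.join_cons_cons,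
      PySem.Chars.join_singleton, h1, h2, h3]
  | a::b::c::d::e::r, k, hk => by
    have ih := pvRenderChunks (e::r) (k+4) (by omega)
    have h4 : k+1+1+1+1 = k + 4 := by omega
    rw [pvRender_cons, pvRender_cons, pvRender_cons, pvRender_cons, h4, ih, pvIns k hk]
    have h1 : ¬ ((k+1) % 4 = 0) := by omega
    have h2 : ¬ ((k+1+1) % 4 = 0) := by omega
    have h3 : ¬ ((k+1+1+1) % 4 = 0) := by omega
    have hpp : pvParts (e::r)
        = PySem.Str.join ", " ((e::r).take 4) :: pvParts ((e::r).drop 4) := by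
      rw [pvParts, dif_neg (by simp : ¬ (e::r) = [])]
    conv_rhs => rw [pvParts, dif_neg (show ¬ (a::b::c::d::e::r) = [] by simp)]
    simp [hpp, PySem.Str.toList_join, PySem.Chars.join_cons_cons,
      PySem.Chars.join_singleton, String.toList_append, h1, h2, h3]
termination_by body _ _ => body.length
decreasing_by simp only [List.length_cons]; omega

-- the two label-building passes agree
theorem pvLabels_eq (atractor : List Int) (nodes : List String) :
    (PySem.List.pyRange 0 (nodes.length : Int) 1).foldl
      (fun acc i =>
        atractor.foldl
          (fun acc2 s =>
            if PySem.Int.mod (s >>> i.toNat) 2 = 1 then acc2 ++ [PySem.List.pyGetD nodes i ""]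
            else acc2)
          acc)
      []
    = (PySem.List.pyRange 0 (nodes.length : Int) 1).flatMap
        (fun i =>
          (atractor.filter (fun s => decide (PySem.Int.mod (s >>> i.toNat) 2 = 1))).map
            (fun _ => PySem.List.pyGetD nodes i "")) := by
  have h1 : (PySem.List.pyRange 0 (nodes.length : Int) 1).foldl
      (fun acc i =>
        atractor.foldl
          (fun acc2 s =>
            if PySem.Int.mod (s >>> i.toNat) 2 = 1 then acc2 ++ [PySem.List.pyGetD nodes i ""]
            else acc2)
          acc)
      []
    = (PySem.List.pyRange 0 (nodes.length : Int) 1).foldl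
      (fun acc i =>
        acc ++ (atractor.filter (fun s => decide (PySem.Int.mod (s >>> i.toNat) 2 = 1))).map
          (fun _ => PySem.List.pyGetD nodes i ""))
      [] :=
    PySem.List.foldl_congr_mem _ _ _ _ (fun acc i _ => PySem.List.foldl_append_ite _ _ _ _)
  rw [h1, PySem.List.foldl_append_eq_flatMap]
  rfl

theorem pvLabel_ne_nil (atractor : List Int) (nodes : List String)
    (h : Pre_getAtractorLabel atractor nodes) :
    (PySem.List.pyRange 0 (nodes.length : Int) 1).flatMap
        (fun i =>
          (atractor.filter (fun s => decide (PySem.Int.mod (s >>> i.toNat) 2 = 1))).map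
            (fun _ => PySem.List.pyGetD nodes i "")) ≠ [] := by
  obtain ⟨i, hi, s, hs, hbit⟩ := h
  intro hnil
  have hmem : PySem.List.pyGetD nodes (i : Int) "" ∈
      (PySem.List.pyRange 0 (nodes.length : Int) 1).flatMap
        (fun i =>
          (atractor.filter (fun s => decide (PySem.Int.mod (s >>> i.toNat) 2 = 1))).map
            (fun _ => PySem.List.pyGetD nodes i "")) := by
    refine List.mem_flatMap.mpr ⟨(i : Int), ?_, ?_⟩
    · rw [PySem.List.mem_pyRange_one]
      constructor <;> [positivity; exact_mod_cast hi]
    · refine List.mem_map.mpr ⟨s, ?_, rfl⟩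
      refine List.mem_filter.mpr ⟨hs, ?_⟩
      simpa using hbit
  rw [hnil] at hmem
  exact (List.not_mem_nil hmem)

-- ===== VERDICT (by name: the statement is the Claim_ definition above) =====
theorem getAtractorLabel_spec : Claim_equal_getAtractorLabel := by
  intro atractor nodes _ hpre
  unfold Spec_getAtractorLabel
  simp only [getAtractorLabel, getAtractorLabel_alt, pvChunksJoin]
  rw [pvLabels_eq]
  set L := (PySem.List.pyRange 0 (nodes.length : Int) 1).flatMap
        (fun i =>
          (atractor.filter (fun s => decide (PySem.Int.mod (s >>> i.toNat) 2 = 1))).map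
            (fun _ => PySem.List.pyGetD nodes i "")) with hLdef
  have hL : L ≠ [] := pvLabel_ne_nil atractor nodes hpre
  have hlen : 1 ≤ L.length := List.length_pos_iff.mpr hL
  have hbody : PySem.List.slice L none (some (-1)) = L.dropLast := PySem.List.slice_to_neg_one L
  have hlast : PySem.List.pyGetD L (-1) "" = L.getLast hL := PySem.List.pyGetD_neg_one _ _ hL
  have hlastA : PySem.List.pyGetD L ((L.length : Int) - 1) "" = L.getLast hL := by
    rw [show ((L.length : Int) - 1) = ((L.length - 1 : Nat) : Int) by omega,
      PySem.List.pyGetD_natCast, List.getD_eq_getElem _ _ (by omega), List.getLast_eq_getElem]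
  have hfold := pvFoldRender L.dropLast L 0 ""
    (fun j hj => by
      simp only [List.length_dropLast] at hj
      rw [show ((0:Nat) : Int) + (j : Int) = ((j:Nat) : Int) by omega, PySem.List.pyGetD_natCast,
        List.getD_eq_getElem _ _ (by omega), List.getElem_dropLast])
  simp only [Nat.cast_zero, zero_add] at hfold
  have hlenD : ((L.dropLast.length : Nat) : Int) = (L.length : Int) - 1 := by
    simp [List.length_dropLast]; omega
  rw [hlenD, pvRenderChunks L.dropLast 0 rfl] at hfold
  rw [hbody, hlast, hlastA, pvPartsEq]
  apply String.toList_inj.mp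
  rw [String.toList_append, hfold]
  by_cases hb : L.dropLast = []
  · simp [hb]
  · simp [hb, String.toList_append]
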